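-- pv_equiv track=rewrite | github.com/ANRROUS/LP_Tic_Tac_Toe | Recurso - Proyecto/prolog-tic-tac-toe/prolog_bridge.py | generate_prolog_statements
-- ===== SOURCE A (Python) =====
-- def generate_prolog_statements(board_size: int):
--     """
--     Genera las cláusulas de Prolog: isWinning, equal y isProperSize
--     según el tamaño dinámico del tablero.
--     Esto permite que el juego se adapte a distintos tamaños sin romper.
--     """
--     board_array = [f"X{i}" for i in range(1, board_size * board_size + 1)]
--     statements_lists = []
--
--     # Generar combinaciones ganadoras verticales
--     for i in range(1, board_size + 1):
--         statements_lists.append([f"X{i + (board_size * j)}" for j in range(board_size)])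
--
--     # Generar combinaciones ganadoras horizontales
--     for i in range(board_size):
--         statements_lists.append([f"X{(i * board_size) + j}" for j in range(1, board_size + 1)])
--
--     # Generar combinaciones diagonales
--     statements_lists.append([f"X{(i * board_size) + i + 1}" for i in range(board_size)])
--     statements_lists.append([f"X{(i * board_size) + (board_size - i)}" for i in range(board_size)])
--
--     statements_string = []
--
--     # Definir cláusula equal dinámica
--     statements_string.append(f"equal({', '.join(['X' for i in range(board_size + 1)])}).")
--     # Clausula de tamaño del tablero
--     statements_string.append(f"isProperSize([{', '.join(['_' for i in range(board_size * board_size)])}]).")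
--
--     # Clausula principal de victoria
--     statements_string.append(f"isWinning(P, [{', '.join(board_array)}]) :-")
--     for statement in statements_lists[:-1]:
--         statements_string.append(f"\tequal(P, {', '.join(statement)});")
--
--     statements_string.append(f"\tequal(P, {', '.join(statements_lists[-1])}).")
--
--     full_prolog_statements = "\n" + "\n".join(statements_string) + "\n"
--     return full_prolog_statements
-- ===== SOURCE B (Python) =====
-- def generate_prolog_statements(board_size: int):
--     """Single sweep over the cells, distributing each cell number into row/column/diagonal buckets."""
--     n = board_size
--     cols = [[] for _ in range(n)]
--     rows = [[] for _ in range(n)]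
--     diag = []
--     anti = []
--     k = 0
--     for r in range(n):
--         for c in range(n):
--             k += 1
--             rows[r].append(k)
--             cols[c].append(k)
--             if r == c:
--                 diag.append(k)
--             if r + c == n - 1:
--                 anti.append(k)
--     lines = cols + rows + [diag, anti]
--     parts = ["equal(%s)." % ", ".join(["X"] * (n + 1)),
--              "isProperSize([%s])." % ", ".join(["_"] * (n * n)),
--              "isWinning(P, [%s]) :-" % ", ".join("X%d" % i for i in range(1, n * n + 1))]
--     bodies = ["\tequal(P, %s)" % ", ".join("X%d" % v for v in line) for line in lines]
--     return "\n" + "\n".join(parts) + "\n" + ";\n".join(bodies) + ".\n"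
-- ===== Notes on version B (the rewrite author's own statement) =====
-- stated objective: alternative
-- what changed: B replaces A's per-line comprehensions (one index formula per winning line) by a single sweep over the board cells with a running counter that distributes each cell number into row/column/diagonal bucket accumulators, then emits the clauses by joining uniform body lines instead of A's append loop with a separate last-statement case.
import Mathlib
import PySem

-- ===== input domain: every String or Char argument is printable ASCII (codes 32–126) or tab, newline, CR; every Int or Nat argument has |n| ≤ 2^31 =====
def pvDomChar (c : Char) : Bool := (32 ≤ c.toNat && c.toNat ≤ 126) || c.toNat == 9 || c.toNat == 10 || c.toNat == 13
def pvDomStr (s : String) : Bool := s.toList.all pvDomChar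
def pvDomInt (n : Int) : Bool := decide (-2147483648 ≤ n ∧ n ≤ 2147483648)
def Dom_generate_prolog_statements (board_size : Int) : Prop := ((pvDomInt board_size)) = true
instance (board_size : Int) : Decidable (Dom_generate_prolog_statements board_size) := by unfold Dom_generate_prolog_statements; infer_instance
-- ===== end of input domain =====

-- B replaces A's per-line comprehensions by ONE sweep over the cells that distributes each cell
-- number into row/column/diagonal buckets, then joins the clause text; same output, alternative algorithm.

-- ===== PORT A =====
-- A, transliterated on List Char (strings are built as code-point lists; String.ofList at the end).
def generate_prolog_statements (board_size : Int) : String :=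
  let board_array := (PySem.List.pyRange 1 (board_size * board_size + 1)).map
      (fun i => 'X' :: PySem.Int.toChars i)
  -- vertical winning combinations
  let statements_lists := (PySem.List.pyRange 1 (board_size + 1)).map
      (fun i => (PySem.List.pyRange 0 board_size).map
        (fun j => 'X' :: PySem.Int.toChars (i + board_size * j)))
  -- horizontal winning combinations
  let statements_lists := statements_lists ++ (PySem.List.pyRange 0 board_size).map
      (fun i => (PySem.List.pyRange 1 (board_size + 1)).map
        (fun j => 'X' :: PySem.Int.toChars (i * board_size + j)))
  -- diagonals
  let statements_lists := statements_lists ++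
      [(PySem.List.pyRange 0 board_size).map
        (fun i => 'X' :: PySem.Int.toChars (i * board_size + i + 1))]
  let statements_lists := statements_lists ++
      [(PySem.List.pyRange 0 board_size).map
        (fun i => 'X' :: PySem.Int.toChars (i * board_size + (board_size - i)))]
  let statements_string : List (List Char) :=
    ["equal(".toList ++
       PySem.Chars.join ", ".toList ((PySem.List.pyRange 0 (board_size + 1)).map (fun _ => "X".toList)) ++
       ").".toList]
  let statements_string := statements_string ++
    ["isProperSize([".toList ++
       PySem.Chars.join ", ".toList ((PySem.List.pyRange 0 (board_size * board_size)).map (fun _ => "_".toList)) ++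
       "]).".toList]
  let statements_string := statements_string ++
    ["isWinning(P, [".toList ++ PySem.Chars.join ", ".toList board_array ++ "]) :-".toList]
  let statements_string := (PySem.List.slice statements_lists none (some (-1))).foldl
    (fun acc statement => acc ++
      ["\tequal(P, ".toList ++ PySem.Chars.join ", ".toList statement ++ ");".toList])
    statements_string
  let statements_string := statements_string ++
    ["\tequal(P, ".toList ++
       PySem.Chars.join ", ".toList (PySem.List.pyGetD statements_lists (-1) []) ++ ").".toList]
  String.ofList ('\n' :: PySem.Chars.join "\n".toList statements_string ++ "\n".toList)

-- ===== PORT B =====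
-- B's loop body: k += 1; rows[r].append(k); cols[c].append(k); the two diagonal tests.
-- State is (cols, rows, diag, anti, k); Python's in-place list mutation rows[r].append(k)
-- is List.modify at index r (r, c are always in range, so .toNat is exact).
def pvCell (n r : Int) (st : List (List Int) × List (List Int) × List Int × List Int × Int)
    (c : Int) : List (List Int) × List (List Int) × List Int × List Int × Int :=
  let k := st.2.2.2.2 + 1
  let rows := st.2.1.modify r.toNat (· ++ [k])
  let cols := st.1.modify c.toNat (· ++ [k])
  let diag := if r = c then st.2.2.1 ++ [k] else st.2.2.1
  let anti := if r + c = n - 1 then st.2.2.2.1 ++ [k] else st.2.2.2.1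
  (cols, rows, diag, anti, k)

-- B, transliterated on List Char: one sweep over the cells filling buckets, then joins.
def generate_prolog_statements_alt (board_size : Int) : String :=
  let n := board_size
  let st := (PySem.List.pyRange 0 n).foldl
    (fun st r => (PySem.List.pyRange 0 n).foldl (pvCell n r) st)
    (List.replicate n.toNat ([] : List Int), List.replicate n.toNat ([] : List Int),
     ([] : List Int), ([] : List Int), (0 : Int))
  let lines := st.1 ++ st.2.1 ++ [st.2.2.1, st.2.2.2.1]
  let parts : List (List Char) :=
    ["equal(".toList ++ PySem.Chars.join ", ".toList (List.replicate (n + 1).toNat "X".toList) ++ ").".toList,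
     "isProperSize([".toList ++ PySem.Chars.join ", ".toList (List.replicate (n * n).toNat "_".toList) ++ "]).".toList,
     "isWinning(P, [".toList ++
       PySem.Chars.join ", ".toList ((PySem.List.pyRange 1 (n * n + 1)).map (fun i => 'X' :: PySem.Int.toChars i)) ++
       "]) :-".toList]
  let bodies := lines.map (fun line =>
    "\tequal(P, ".toList ++
      PySem.Chars.join ", ".toList (line.map (fun v => 'X' :: PySem.Int.toChars v)) ++ ")".toList)
  String.ofList ('\n' :: PySem.Chars.join "\n".toList parts ++ "\n".toList ++
    PySem.Chars.join ";\n".toList bodies ++ ".\n".toList)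

-- ===== PRECONDITION & SPEC =====
def Spec_generate_prolog_statements (board_size : Int) (out : String) : Prop := out = generate_prolog_statements_alt board_size
instance (board_size : Int) (out : String) : Decidable (Spec_generate_prolog_statements board_size out) := by unfold Spec_generate_prolog_statements; infer_instance

-- ===== CLAIM (what is proved, stated in full; the proofs are below) =====
def Claim_equal_generate_prolog_statements : Prop := ∀ (board_size : Int), Dom_generate_prolog_statements board_size → Spec_generate_prolog_statements board_size (generate_prolog_statements board_size)

-- ===== LEMMAS AND PROOFS =====

-- two modifications at the same index compose
theorem pv_modify_modify {α : Type} (l : List α) (i : Nat) (f g : α → α) :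
    (l.modify i f).modify i g = l.modify i (fun x => g (f x)) := by
  apply List.ext_getElem
  · simp [List.length_modify]
  · intro t h1 h2
    simp only [List.getElem_modify]
    by_cases h : i = t <;> simp [h]

-- modifying index j (0 ≤ j < n) of a range-map pushes the update into the function
theorem pv_modify_map_pyRange (n : Int) (F : Int → List Int) (G : List Int) (j : Int)
    (h0 : 0 ≤ j) (_hj : j < n) :
    ((PySem.List.pyRange 0 n).map F).modify j.toNat (· ++ G)
    = (PySem.List.pyRange 0 n).map (fun c => if c = j then F j ++ G else F c) := by
  apply List.ext_getElem
  · rw [List.length_modify]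
    simp
  · intro t h1 h2
    rw [List.getElem_modify]
    simp only [List.getElem_map, PySem.List.getElem_pyRange_one]
    by_cases hc : j.toNat = t
    · rw [if_pos hc, if_pos (show (0 : Int) + t = j by omega),
          show (0 : Int) + t = j from by omega]
    · rw [if_neg hc, if_neg (show ¬ (0 : Int) + t = j by omega)]

-- a fold of in-place appends over range(j, n) appends G c at every slot c ≥ j
theorem pv_fold_modify (n : Int) (G : Int → List Int) (j : Int) (h0 : 0 ≤ j)
    (F : Int → List Int) :
    (PySem.List.pyRange j n).foldl (fun ls c => ls.modify c.toNat (· ++ G c))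
        ((PySem.List.pyRange 0 n).map F)
    = (PySem.List.pyRange 0 n).map (fun c => if j ≤ c then F c ++ G c else F c) := by
  by_cases hlt : j < n
  · rw [PySem.List.pyRange_one_cons hlt]
    simp only [List.foldl_cons]
    rw [pv_modify_map_pyRange n F (G j) j h0 hlt,
        pv_fold_modify n G (j + 1) (by omega) (fun c => if c = j then F j ++ G j else F c)]
    apply List.map_congr_left
    intro c _
    split_ifs <;> (try subst_vars) <;> first | rfl | (exfalso; omega)
  · rw [show PySem.List.pyRange j n = [] from PySem.List.pyRange_one_eq_nil (by omega)]
    simp only [List.foldl_nil]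
    apply List.map_congr_left
    intro c hc
    have h := (PySem.List.mem_pyRange_one).mp hc
    rw [if_neg (by omega)]
termination_by (n - j).toNat
decreasing_by omega

-- modifying with an empty append changes nothing
theorem pv_modify_nil (l : List (List Int)) (i : Nat) :
    l.modify i (· ++ ([] : List Int)) = l := by
  apply List.ext_getElem
  · rw [List.length_modify]
  · intro t h1 h2
    rw [List.getElem_modify]
    split <;> simp

-- one row of B's sweep: row r collects the whole block, each column one cell, the diagonals at most one
theorem pv_row (n r : Int) (h0 : 0 ≤ r) (hr : r < n) (j : Int) (hj0 : 0 ≤ j) (hjn : j ≤ n)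
    (cols rows : List (List Int)) (diag anti : List Int) :
    (PySem.List.pyRange j n).foldl (pvCell n r) (cols, rows, diag, anti, r * n + j)
    = ((PySem.List.pyRange j n).foldl (fun ls c => ls.modify c.toNat (· ++ [r * n + c + 1])) cols,
       rows.modify r.toNat (· ++ (PySem.List.pyRange j n).map (fun c => r * n + c + 1)),
       diag ++ (if j ≤ r then [r * n + r + 1] else []),
       anti ++ (if j ≤ n - 1 - r then [r * n + (n - r)] else []),
       r * n + n) := by
  by_cases hlt : j < n
  · rw [PySem.List.pyRange_one_cons hlt]
    simp only [List.foldl_cons, List.map_cons]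
    have hcell : pvCell n r (cols, rows, diag, anti, r * n + j) j =
        (cols.modify j.toNat (· ++ [r * n + j + 1]), rows.modify r.toNat (· ++ [r * n + j + 1]),
         if r = j then diag ++ [r * n + j + 1] else diag,
         if r + j = n - 1 then anti ++ [r * n + j + 1] else anti, r * n + j + 1) := by
      simp [pvCell]
    rw [hcell,
        show r * n + j + 1 = r * n + (j + 1) by ring,
        pv_row n r h0 hr (j + 1) (by omega) (by omega)]
    have hrows : ((rows.modify r.toNat (· ++ [r * n + (j + 1)])).modify r.toNat
          (· ++ (PySem.List.pyRange (j + 1) n).map (fun c => r * n + c + 1)))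
        = rows.modify r.toNat
            (· ++ (r * n + (j + 1)) :: (PySem.List.pyRange (j + 1) n).map (fun c => r * n + c + 1)) := by
      rw [pv_modify_modify]
      congr 1
      funext x
      simp
    have hdiag : (if r = j then diag ++ [r * n + (j + 1)] else diag) ++
          (if j + 1 ≤ r then [r * n + r + 1] else [])
        = diag ++ (if j ≤ r then [r * n + r + 1] else []) := by
      by_cases hc : r = j
      · rw [if_pos hc, if_neg (by omega), if_pos (by omega)]
        have : r * n + (j + 1) = r * n + r + 1 := by rw [hc]; ring
        rw [this]
        simp
      · rw [if_neg hc]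
        by_cases hle : j ≤ r
        · rw [if_pos (by omega), if_pos hle]
        · rw [if_neg (by omega), if_neg hle]
    have hanti : (if r + j = n - 1 then anti ++ [r * n + (j + 1)] else anti) ++
          (if j + 1 ≤ n - 1 - r then [r * n + (n - r)] else [])
        = anti ++ (if j ≤ n - 1 - r then [r * n + (n - r)] else []) := by
      by_cases hc : r + j = n - 1
      · rw [if_pos hc, if_neg (by omega), if_pos (by omega)]
        have : j + 1 = n - r := by omega
        rw [this]
        simp
      · rw [if_neg hc]
        by_cases hle : j + 1 ≤ n - 1 - r
        · rw [if_pos hle, if_pos (by omega)]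
        · rw [if_neg hle, if_neg (by omega)]
    rw [hrows, hdiag, hanti]
  · rw [show j = n from by omega,
        show PySem.List.pyRange n n = [] from PySem.List.pyRange_one_eq_nil (le_refl n)]
    simp only [List.foldl_nil, List.map_nil]
    rw [if_neg (by omega), if_neg (by omega), pv_modify_nil]
    simp
termination_by (n - j).toNat
decreasing_by omega

-- the whole sweep from row i on, with the counter at i*n
theorem pv_outer (n i : Int) (h0 : 0 ≤ i) (hin : i ≤ n)
    (cols rows : List (List Int)) (diag anti : List Int) :
    (PySem.List.pyRange i n).foldl
        (fun st r => (PySem.List.pyRange 0 n).foldl (pvCell n r) st)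
        (cols, rows, diag, anti, i * n)
    = ((PySem.List.pyRange i n).foldl
         (fun cs r => (PySem.List.pyRange 0 n).foldl
            (fun ls c => ls.modify c.toNat (· ++ [r * n + c + 1])) cs) cols,
       (PySem.List.pyRange i n).foldl
         (fun rs r => rs.modify r.toNat (· ++ (PySem.List.pyRange 0 n).map (fun c => r * n + c + 1))) rows,
       diag ++ (PySem.List.pyRange i n).map (fun r => r * n + r + 1),
       anti ++ (PySem.List.pyRange i n).map (fun r => r * n + (n - r)),
       n * n) := by
  by_cases hlt : i < n
  · rw [PySem.List.pyRange_one_cons hlt]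
    simp only [List.foldl_cons, List.map_cons]
    have H := pv_row n i h0 hlt 0 (le_refl 0) (by omega) cols rows diag anti
    rw [add_zero] at H
    rw [H, if_pos h0, if_pos (show (0 : Int) ≤ n - 1 - i by omega),
        show i * n + n = (i + 1) * n by ring,
        pv_outer n (i + 1) (by omega) (by omega)]
    simp [List.append_assoc]
  · rw [show i = n from by omega,
        show PySem.List.pyRange n n = [] from PySem.List.pyRange_one_eq_nil (le_refl n)]
    simp
termination_by (n - i).toNat
decreasing_by omega

-- column buckets: iterating pv_fold_modify over the rows
theorem pv_cols_final (n i : Int) (h0 : 0 ≤ i) (F : Int → List Int) :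
    (PySem.List.pyRange i n).foldl
        (fun cs r => (PySem.List.pyRange 0 n).foldl
           (fun ls c => ls.modify c.toNat (· ++ [r * n + c + 1])) cs)
        ((PySem.List.pyRange 0 n).map F)
    = (PySem.List.pyRange 0 n).map (fun c => F c ++ (PySem.List.pyRange i n).map (fun r => r * n + c + 1)) := by
  by_cases hlt : i < n
  · rw [PySem.List.pyRange_one_cons hlt]
    simp only [List.foldl_cons, List.map_cons]
    rw [pv_fold_modify n (fun c => [i * n + c + 1]) 0 (le_refl 0) F]
    have hmap : (PySem.List.pyRange 0 n).map (fun c => if 0 ≤ c then F c ++ [i * n + c + 1] else F c)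
        = (PySem.List.pyRange 0 n).map (fun c => F c ++ [i * n + c + 1]) := by
      apply List.map_congr_left
      intro c hc
      exact if_pos ((PySem.List.mem_pyRange_one).mp hc).1
    rw [hmap, pv_cols_final n (i + 1) (by omega) (fun c => F c ++ [i * n + c + 1])]
    simp
  · rw [show PySem.List.pyRange i n = [] from PySem.List.pyRange_one_eq_nil (by omega)]
    simp
termination_by (n - i).toNat
decreasing_by omega

-- the final bucket state of B's sweep, in closed form (0 ≤ n)
theorem pv_state (n : Int) (hn : 0 ≤ n) :
    (PySem.List.pyRange 0 n).foldl
        (fun st r => (PySem.List.pyRange 0 n).foldl (pvCell n r) st)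
        (List.replicate n.toNat ([] : List Int), List.replicate n.toNat ([] : List Int),
         ([] : List Int), ([] : List Int), (0 : Int))
    = ((PySem.List.pyRange 0 n).map (fun c => (PySem.List.pyRange 0 n).map (fun r => r * n + c + 1)),
       (PySem.List.pyRange 0 n).map (fun r => (PySem.List.pyRange 0 n).map (fun c => r * n + c + 1)),
       (PySem.List.pyRange 0 n).map (fun i => i * n + i + 1),
       (PySem.List.pyRange 0 n).map (fun i => i * n + (n - i)),
       n * n) := by
  have hrep : List.replicate n.toNat ([] : List Int)
      = (PySem.List.pyRange 0 n).map (fun _ => ([] : List Int)) := by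
    rw [List.map_const', PySem.List.length_pyRange_one]
    congr 1
    omega
  have H := pv_outer n 0 (le_refl 0) hn
      ((PySem.List.pyRange 0 n).map (fun _ => ([] : List Int)))
      ((PySem.List.pyRange 0 n).map (fun _ => ([] : List Int))) [] []
  rw [zero_mul] at H
  have hcols : (PySem.List.pyRange 0 n).foldl
        (fun cs r => (PySem.List.pyRange 0 n).foldl
           (fun ls c => ls.modify c.toNat (· ++ [r * n + c + 1])) cs)
        ((PySem.List.pyRange 0 n).map (fun _ => ([] : List Int)))
      = (PySem.List.pyRange 0 n).map (fun c => (PySem.List.pyRange 0 n).map (fun r => r * n + c + 1)) := by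
    rw [pv_cols_final n 0 (le_refl 0)]
    simp
  have hrows : (PySem.List.pyRange 0 n).foldl
        (fun rs r => rs.modify r.toNat (· ++ (PySem.List.pyRange 0 n).map (fun c => r * n + c + 1)))
        ((PySem.List.pyRange 0 n).map (fun _ => ([] : List Int)))
      = (PySem.List.pyRange 0 n).map (fun r => (PySem.List.pyRange 0 n).map (fun c => r * n + c + 1)) := by
    rw [pv_fold_modify n (fun r => (PySem.List.pyRange 0 n).map (fun c => r * n + c + 1)) 0 (le_refl 0)]
    apply List.map_congr_left
    intro r hr
    rw [if_pos ((PySem.List.mem_pyRange_one).mp hr).1]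
    simp
  rw [hrep, H, hcols, hrows]
  simp

-- range(1, n+1) is range(0, n) shifted by one
theorem pv_shift (n : Int) :
    PySem.List.pyRange 1 (n + 1) = List.map (fun x => x + 1) (PySem.List.pyRange 0 n) := by
  rw [PySem.List.pyRange_one 1 (n+1), PySem.List.pyRange_one 0 n, List.map_map]
  have hn : (n + 1 - 1).toNat = (n - 0).toNat := by omega
  rw [hn]
  apply List.map_congr_left
  intro k _
  simp only [Function.comp]
  omega

-- join: peel one line off a '\n'-join of a nonempty rest
theorem pv_join_step (x : List Char) (ys : List (List Char)) (h : ys ≠ []) :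
    PySem.Chars.join "\n".toList (x :: ys) = x ++ "\n".toList ++ PySem.Chars.join "\n".toList ys := by
  obtain ⟨y, ys, rfl⟩ := List.exists_cons_of_ne_nil h
  rw [PySem.Chars.join_cons_cons]

-- body lines joined by '\n' with trailing ';'/'.' = lines joined by ';\n' with one final '.'
theorem pv_join_semi {alpha : Type} (p q : List Char) (f : alpha → List Char) :
    ∀ (bs : List alpha) (lb : alpha),
    PySem.Chars.join "\n".toList (List.map (fun b => p ++ (f b ++ (q ++ [';']))) bs ++ [p ++ (f lb ++ (q ++ ['.']))])
    = PySem.Chars.join ";\n".toList (List.map (fun b => p ++ (f b ++ q)) (bs ++ [lb])) ++ ['.']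
  | [], lb => by simp [PySem.Chars.join_singleton]
  | b :: bs, lb => by
    have ih := pv_join_semi p q f bs lb
    cases bs with
    | nil =>
      simp [PySem.Chars.join_cons_cons, PySem.Chars.join_singleton, List.append_assoc]
    | cons b' bs' =>
      simp only [List.map_cons, List.cons_append, PySem.Chars.join_cons_cons]
      simp only [List.map_cons, List.cons_append] at ih
      rw [ih]
      simp [List.append_assoc]

theorem pv_colsA (n : Int) :
    List.map (fun i => List.map (fun j => 'X' :: PySem.Int.toChars (i + n * j)) (PySem.List.pyRange 0 n)) (PySem.List.pyRange 1 (n + 1))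
    = List.map (List.map (fun v => 'X' :: PySem.Int.toChars v))
        (List.map (fun c => List.map (fun r => r * n + c + 1) (PySem.List.pyRange 0 n)) (PySem.List.pyRange 0 n)) := by
  rw [pv_shift n, List.map_map, List.map_map]
  apply List.map_congr_left
  intro c _
  simp only [Function.comp, List.map_map]
  apply List.map_congr_left
  intro r _
  simp only [Function.comp]
  congr 2
  ring

theorem pv_rowsA (n : Int) :
    List.map (fun i => List.map (fun j => 'X' :: PySem.Int.toChars (i * n + j)) (PySem.List.pyRange 1 (n + 1))) (PySem.List.pyRange 0 n)
    = List.map (List.map (fun v => 'X' :: PySem.Int.toChars v))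
        (List.map (fun r => List.map (fun c => r * n + c + 1) (PySem.List.pyRange 0 n)) (PySem.List.pyRange 0 n)) := by
  rw [List.map_map]
  apply List.map_congr_left
  intro r _
  simp only [Function.comp]
  rw [pv_shift n, List.map_map, List.map_map]
  apply List.map_congr_left
  intro c _
  simp only [Function.comp]
  congr 2
  ring

theorem pv_diagA (n : Int) :
    List.map (fun i => 'X' :: PySem.Int.toChars (i * n + i + 1)) (PySem.List.pyRange 0 n)
    = List.map (fun v => 'X' :: PySem.Int.toChars v) (List.map (fun i => i * n + i + 1) (PySem.List.pyRange 0 n)) := by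
  rw [List.map_map]
  rfl

theorem pv_antiA (n : Int) :
    List.map (fun i => 'X' :: PySem.Int.toChars (i * n + (n - i))) (PySem.List.pyRange 0 n)
    = List.map (fun v => 'X' :: PySem.Int.toChars v) (List.map (fun i => i * n + (n - i)) (PySem.List.pyRange 0 n)) := by
  rw [List.map_map]
  rfl

theorem pv_main_pos (n : Int) (hn : 0 ≤ n) :
    generate_prolog_statements n = generate_prolog_statements_alt n := by
  simp only [generate_prolog_statements, generate_prolog_statements_alt]
  rw [pv_state n hn]
  simp only []
  rw [pv_colsA n, pv_rowsA n, pv_diagA n, pv_antiA n]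
  set mX := List.map (fun v : Int => 'X' :: PySem.Int.toChars v) with hmX
  set C := List.map (fun c => List.map (fun r => r * n + c + 1) (PySem.List.pyRange 0 n)) (PySem.List.pyRange 0 n) with hC
  set G := List.map (fun r => List.map (fun c => r * n + c + 1) (PySem.List.pyRange 0 n)) (PySem.List.pyRange 0 n) with hG
  set D1 := List.map (fun i => i * n + i + 1) (PySem.List.pyRange 0 n) with hD1
  set D2 := List.map (fun i => i * n + (n - i)) (PySem.List.pyRange 0 n) with hD2
  have hsl : List.map mX C ++ List.map mX G ++ [mX D1] ++ [mX D2]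
      = List.map mX (C ++ G ++ [D1]) ++ [mX D2] := by
    simp [List.map_append]
  rw [hsl, PySem.List.slice_to_neg_one, List.dropLast_concat,
      PySem.List.pyGetD_neg_one_append_singleton,
      PySem.List.foldl_append_singleton_eq_map]
  rw [List.map_map]
  have hf : ((fun statement => "\tequal(P, ".toList ++ PySem.Chars.join ", ".toList statement ++ ");".toList) ∘ mX)
      = fun line => "\tequal(P, ".toList ++ (PySem.Chars.join ", ".toList (mX line) ++ (")".toList ++ [';'])) := by
    funext line
    simp
  rw [hf]
  have hlast : "\tequal(P, ".toList ++ PySem.Chars.join ", ".toList (mX D2) ++ ").".toList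
      = "\tequal(P, ".toList ++ (PySem.Chars.join ", ".toList (mX D2) ++ (")".toList ++ ['.'])) := by
    simp
  rw [hlast]
  simp only [List.cons_append, List.nil_append, List.append_assoc]
  rw [pv_join_step _ _ (by simp), pv_join_step _ _ (by simp), pv_join_step _ _ (by simp),
      pv_join_semi "\tequal(P, ".toList ")".toList (fun b => PySem.Chars.join ", ".toList (mX b)) (C ++ (G ++ [D1])) D2]
  have h1 : List.map (fun x => "X".toList) (PySem.List.pyRange 0 (n + 1)) = List.replicate (n + 1).toNat "X".toList := by
    rw [List.map_const', PySem.List.length_pyRange_one]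
    congr 1
    omega
  have h2 : List.map (fun x => "_".toList) (PySem.List.pyRange 0 (n * n)) = List.replicate (n * n).toNat "_".toList := by
    rw [List.map_const', PySem.List.length_pyRange_one]
    congr 1
    omega
  rw [h1, h2]
  simp [PySem.Chars.join_cons_cons, PySem.Chars.join_singleton, List.append_assoc]

theorem pv_main_neg (n : Int) (hn : n < 0) :
    generate_prolog_statements n = generate_prolog_statements_alt n := by
  simp only [generate_prolog_statements, generate_prolog_statements_alt]
  rw [show PySem.List.pyRange 0 n = [] from PySem.List.pyRange_one_eq_nil (by omega),
      show PySem.List.pyRange 1 (n + 1) = [] from PySem.List.pyRange_one_eq_nil (by omega),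
      show PySem.List.pyRange 0 (n + 1) = [] from PySem.List.pyRange_one_eq_nil (by omega),
      show n.toNat = 0 from by omega,
      show (n + 1).toNat = 0 from by omega]
  have h2 : List.map (fun x : Int => "_".toList) (PySem.List.pyRange 0 (n * n)) = List.replicate (n * n).toNat "_".toList := by
    rw [List.map_const', PySem.List.length_pyRange_one]
    congr 1
    omega
  rw [h2]
  simp [PySem.Chars.join_cons_cons, PySem.Chars.join_singleton, PySem.List.slice_to_neg_one,
        PySem.List.pyGetD, PySem.List.pyGet?, PySem.List.pyIdx?, PySem.List.slice, PySem.List.clampIdx]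

theorem pv_main (n : Int) :
    generate_prolog_statements n = generate_prolog_statements_alt n := by
  by_cases hn : 0 ≤ n
  · exact pv_main_pos n hn
  · exact pv_main_neg n (by omega)

-- ===== VERDICT (by name: the statement is the Claim_ definition above) =====
theorem generate_prolog_statements_spec : Claim_equal_generate_prolog_statements := by
  intro n _
  exact pv_main n
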